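-- pv_equiv track=rewrite | github.com/WizardNo7/League_Ranker | ranker/ranker.py | format_rankings
-- ===== SOURCE A (Python) =====
-- def format_rankings(scored_results):
--     """Take dict of teams per point, and format them into list for printing."""
--     rankings = []
--
--     place = 1
--     for points in (sorted(scored_results, reverse=True)):
--         suffix = ""
--         if points != 1:
--             suffix = "s"
--
--         if len(scored_results[points]) > 1:
--             for team in sorted(scored_results[points]):
--                 rankings.append(f"{place}. {team}, {points} pt{suffix}")
--             place += len(scored_results[points])
--         else:
--             rankings.append(
--                 f"{place}. {scored_results[points][0]}, {points} pt{suffix}")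
--             place += 1
--
--     return rankings
-- ===== SOURCE B (Python) =====
-- def format_rankings(scored_results):
--     """Take dict of teams per point, and format them into list for printing."""
--     flat = [(points, team)
--             for points, group in sorted(scored_results.items(), key=lambda kv: -kv[0])
--             for team in sorted(group)]
--     rankings = []
--     place = 0
--     prev = None
--     for i, (points, team) in enumerate(flat):
--         if prev is None or points != prev:
--             place = i + 1
--         prev = points
--         rankings.append(f"{place}. {team}, {points} pt{'' if points == 1 else 's'}")
--     return rankings
-- ===== Notes on version B (the rewrite author's own statement) =====
-- stated objective: alternative
-- what changed: B flattens the dict into one (points, team) list ordered by sorting items on -points and teams per group, then assigns places in a single scan that resets the place to i+1 whenever the points value changes, instead of A's nested loops over sorted keys with dict lookups, a running place counter incremented by group size, and a separate single-team branch.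
import Mathlib
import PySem

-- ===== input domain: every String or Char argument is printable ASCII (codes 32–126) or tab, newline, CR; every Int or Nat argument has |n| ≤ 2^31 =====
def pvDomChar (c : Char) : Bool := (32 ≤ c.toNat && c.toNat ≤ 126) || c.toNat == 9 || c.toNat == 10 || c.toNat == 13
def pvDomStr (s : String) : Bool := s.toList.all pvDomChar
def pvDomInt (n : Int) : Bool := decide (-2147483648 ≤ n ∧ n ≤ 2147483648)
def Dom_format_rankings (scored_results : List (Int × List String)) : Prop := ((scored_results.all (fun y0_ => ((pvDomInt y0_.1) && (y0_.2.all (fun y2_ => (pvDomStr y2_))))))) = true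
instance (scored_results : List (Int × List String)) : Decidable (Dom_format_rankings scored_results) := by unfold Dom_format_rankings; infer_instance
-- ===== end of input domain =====

-- B replaces A's nested group loops (sorted keys, dict lookups, running place counter,
-- separate single-team branch) by one flat sorted (points, team) list scanned once,
-- resetting the place to i+1 whenever the points value changes: same cost, different decomposition.

-- ===== PORT A =====
def format_rankings (scored_results : List (Int × List String)) : List String :=
  ((PySem.List.sorted (PySem.Dict.ofList scored_results).keys (fun k => k) true).foldl
    (fun st points =>
      let suffix : String := if points ≠ 1 then "s" else ""
      let grp := (PySem.Dict.ofList scored_results).getD points []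
      if grp.length > 1 then
        ((PySem.List.sorted grp (fun t => t) false).foldl
          (fun r team =>
            r ++ [PySem.Int.toStr st.2 ++ ". " ++ team ++ ", " ++ PySem.Int.toStr points ++ " pt" ++ suffix])
          st.1,
         st.2 + (grp.length : Int))
      else
        (st.1 ++ [PySem.Int.toStr st.2 ++ ". " ++ PySem.List.pyGetD grp 0 "" ++ ", " ++ PySem.Int.toStr points ++ " pt" ++ suffix],
         st.2 + 1))
    ([], 1)).1

-- ===== PORT B =====
def format_rankings_alt (scored_results : List (Int × List String)) : List String :=
  ((PySem.List.enumerate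
      ((PySem.List.sorted (PySem.Dict.ofList scored_results).items (fun kv => -kv.1) false).flatMap
        (fun kv => (PySem.List.sorted kv.2 (fun t => t) false).map (fun t => (kv.1, t))))
      0).foldl
    (fun st it =>
      let place := if st.2.2 = none ∨ some it.2.1 ≠ st.2.2 then it.1 + 1 else st.2.1
      (st.1 ++ [PySem.Int.toStr place ++ ". " ++ it.2.2 ++ ", " ++ PySem.Int.toStr it.2.1 ++ " pt" ++
                (if it.2.1 = 1 then "" else "s")],
       place, some it.2.1))
    ([], 0, none)).1

-- ===== PRECONDITION & SPEC =====
-- Pre_ excludes dicts in which some points key maps to an EMPTY team list: there A raises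
-- IndexError (scored_results[points][0] in the single-team branch), returning nothing.
def Pre_format_rankings (scored_results : List (Int × List String)) : Prop :=
  ∀ kv ∈ (PySem.Dict.ofList scored_results).items, kv.2 ≠ []
instance (scored_results : List (Int × List String)) : Decidable (Pre_format_rankings scored_results) := by unfold Pre_format_rankings; infer_instance
def pvWitness_format_rankings : (List (Int × List String)) := [(3, ["a", "b"]), (1, ["c"])]

def Spec_format_rankings (scored_results : List (Int × List String)) (out : List String) : Prop := out = format_rankings_alt scored_results
instance (scored_results : List (Int × List String)) (out : List String) : Decidable (Spec_format_rankings scored_results out) := by unfold Spec_format_rankings; infer_instance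

-- ===== CLAIM (what is proved, stated in full; the proofs are below) =====
def Claim_equal_format_rankings : Prop := ∀ (scored_results : List (Int × List String)), Dom_format_rankings scored_results → Pre_format_rankings scored_results → Spec_format_rankings scored_results (format_rankings scored_results)
-- ===== LEMMAS AND PROOFS =====

/-- The formatted line both programs emit. -/
def pvFmt (place : Int) (team : String) (points : Int) : String :=
  PySem.Int.toStr place ++ ". " ++ team ++ ", " ++ PySem.Int.toStr points ++ " pt" ++
    (if points = 1 then "" else "s")

/-- Reference output: groups in order, each group's teams sorted, shared place n+1,
    where n is the number of lines already emitted. -/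
def pvLines (gs : List (Int × List String)) (n : Int) : List String :=
  match gs with
  | [] => []
  | g :: rest =>
      (PySem.List.sorted g.2 (fun t => t) false).map (fun t => pvFmt (n + 1) t g.1) ++
      pvLines rest (n + (g.2.length : Int))

theorem A_fold (d : PySem.Dict Int (List String)) :
    ∀ (ks : List Int) (acc : List String) (n : Int),
      (∀ k ∈ ks, d.getD k [] ≠ []) →
      ((ks.foldl
        (fun st points =>
          if (d.getD points []).length > 1 then
            ((PySem.List.sorted (d.getD points []) (fun t => t) false).foldl
              (fun r team =>
                r ++ [PySem.Int.toStr st.2 ++ ". " ++ team ++ ", " ++ PySem.Int.toStr points ++ " pt" ++ (if points ≠ 1 then "s" else "")])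
              st.1,
             st.2 + ((d.getD points []).length : Int))
          else
            (st.1 ++ [PySem.Int.toStr st.2 ++ ". " ++ PySem.List.pyGetD (d.getD points []) 0 "" ++ ", " ++ PySem.Int.toStr points ++ " pt" ++ (if points ≠ 1 then "s" else "")],
             st.2 + 1))
        (acc, n + 1)).1
       = acc ++ pvLines (ks.map (fun k => (k, d.getD k []))) n) := by
  intro ks
  induction ks with
  | nil => intro acc n h; simp [pvLines]
  | cons k ks ih =>
    intro acc n h
    have hk : d.getD k [] ≠ [] := h k (by simp)
    simp only [List.foldl_cons, List.map_cons, pvLines]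
    by_cases hlen : (d.getD k []).length > 1
    · rw [if_pos hlen, PySem.List.foldl_append_singleton_eq_map,
          show (n + 1 : Int) + ((d.getD k []).length : Int) = (n + ((d.getD k []).length : Int)) + 1 by ring,
          ih _ _ (fun k hk => h k (by simp [hk]))]
      simp [pvFmt, List.append_assoc]
    · have h1 : (d.getD k []).length = 1 := by
        rcases Nat.lt_or_ge (d.getD k []).length 1 with h' | h'
        · exact absurd (List.length_eq_zero_iff.1 (by omega)) hk
        · omega
      obtain ⟨t, ht⟩ := List.length_eq_one_iff.1 h1
      rw [ht, if_neg (by simp),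
          show (n : Int) + 1 + 1 = (n + 1) + 1 by ring,
          ih _ _ (fun k hk => h k (by simp [hk]))]
      have hs : PySem.List.sorted [t] (fun t => t) false = [t] :=
        PySem.List.sorted_eq_self_of_pairwise _ _ (by simp)
      simp [hs, pvFmt, PySem.List.pyGetD, List.append_assoc]

theorem B_rest (p : Int) :
    ∀ (ts : List String) (n pl : Int) (acc : List String),
      ((PySem.List.enumerate (ts.map (fun t => (p, t))) n).foldl
        (fun st it =>
          (st.1 ++ [PySem.Int.toStr (if st.2.2 = none ∨ some it.2.1 ≠ st.2.2 then it.1 + 1 else st.2.1) ++ ". " ++ it.2.2 ++ ", " ++ PySem.Int.toStr it.2.1 ++ " pt" ++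
                    (if it.2.1 = 1 then "" else "s")],
           (if st.2.2 = none ∨ some it.2.1 ≠ st.2.2 then it.1 + 1 else st.2.1), some it.2.1))
        (acc, pl, some p))
      = (acc ++ ts.map (fun t => pvFmt pl t p), pl, some p) := by
  intro ts
  induction ts with
  | nil => intro n pl acc; simp
  | cons t ts ih =>
    intro n pl acc
    simp [PySem.List.enumerate_cons, pvFmt, ih]

theorem B_outer :
    ∀ (gs : List (Int × List String)) (acc : List String) (pl n : Int) (prev : Option Int),
      (∀ g ∈ gs, g.2 ≠ []) →
      gs.Pairwise (fun a b => a.1 ≠ b.1) →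
      (∀ g ∈ gs, prev ≠ some g.1) →
      ((PySem.List.enumerate
          (gs.flatMap (fun kv => (PySem.List.sorted kv.2 (fun t => t) false).map (fun t => (kv.1, t)))) n).foldl
        (fun st it =>
          (st.1 ++ [PySem.Int.toStr (if st.2.2 = none ∨ some it.2.1 ≠ st.2.2 then it.1 + 1 else st.2.1) ++ ". " ++ it.2.2 ++ ", " ++ PySem.Int.toStr it.2.1 ++ " pt" ++
                    (if it.2.1 = 1 then "" else "s")],
           (if st.2.2 = none ∨ some it.2.1 ≠ st.2.2 then it.1 + 1 else st.2.1), some it.2.1))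
        (acc, pl, prev)).1
      = acc ++ pvLines gs n := by
  intro gs
  induction gs with
  | nil => intro acc pl n prev _ _ _; simp [pvLines]
  | cons g gs ih =>
    intro acc pl n prev hne hpw hprev
    obtain ⟨t, ts, hst⟩ : ∃ t ts, PySem.List.sorted g.2 (fun t => t) false = t :: ts := by
      cases hs : PySem.List.sorted g.2 (fun t => t) false with
      | nil => exact absurd ((PySem.List.sorted_eq_nil_iff _ _ _).1 hs) (hne g (by simp))
      | cons a l => exact ⟨a, l, rfl⟩
    have hcond : (prev = none ∨ some g.1 ≠ prev) := Or.inr (Ne.symm (hprev g (by simp)))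
    have hlen : g.2.length = ts.length + 1 := by
      have h := PySem.List.length_sorted g.2 (fun t => t) false
      rw [hst] at h; simpa using h.symm
    have hprev' : ∀ g' ∈ gs, some g.1 ≠ some g'.1 := by
      intro g' hg'
      simpa using ((List.pairwise_cons.1 hpw).1 g' hg')
    simp only [List.flatMap_cons, hst, List.map_cons, PySem.List.enumerate_append,
      List.foldl_append, PySem.List.enumerate_cons, List.foldl_cons, pvLines]
    rw [if_pos hcond, B_rest,
        ih _ _ _ _ (fun g' hg' => hne g' (by simp [hg'])) (List.pairwise_cons.1 hpw).2 hprev']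
    simp [pvFmt, hlen, List.append_assoc]

-- ===== VERDICT (by name: the statement is the Claim_ definition above) =====
theorem format_rankings_spec : Claim_equal_format_rankings := by
  intro sr hdom hpre
  unfold Spec_format_rankings
  simp only [format_rankings, format_rankings_alt]
  have hnd : (PySem.Dict.ofList sr).keys.Nodup := PySem.Dict.nodup_keys_ofList sr
  have hitems : (PySem.Dict.ofList sr).items
      = (PySem.Dict.ofList sr).keys.map (fun k => (k, (PySem.Dict.ofList sr).getD k [])) :=
    PySem.Dict.items_eq_map_keys _ hnd []
  have hmem : ∀ k ∈ PySem.List.sorted (PySem.Dict.ofList sr).keys (fun k => k) true,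
      (PySem.Dict.ofList sr).getD k [] ≠ [] := by
    intro k hk
    have hk' : k ∈ (PySem.Dict.ofList sr).keys := (PySem.List.mem_sorted _ _ _ _).1 hk
    exact hpre (k, (PySem.Dict.ofList sr).getD k []) (by rw [hitems]; exact List.mem_map_of_mem hk')
  have hnds : (PySem.List.sorted (PySem.Dict.ofList sr).keys (fun k => k) true).Nodup :=
    ((PySem.List.sorted_perm _ _ _).nodup_iff).2 hnd
  have hgt : (PySem.List.sorted (PySem.Dict.ofList sr).keys (fun k => k) true).Pairwise
      (fun a b => b < a) := by
    have h1 := PySem.List.sorted_pairwise_rev (PySem.Dict.ofList sr).keys (fun k => k)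
    exact (h1.and hnds).imp (fun h => lt_of_le_of_ne h.1 h.2.symm)
  have hstep1 : PySem.List.sorted (PySem.Dict.ofList sr).items (fun kv => -kv.1) false
      = (PySem.List.sorted (PySem.Dict.ofList sr).keys (fun k => k) true).map
          (fun k => (k, (PySem.Dict.ofList sr).getD k [])) := by
    apply PySem.List.sorted_eq_of_perm_of_pairwise_lt
    · rw [hitems]; exact (PySem.List.sorted_perm _ _ _).map _
    · exact List.pairwise_map.2 (hgt.imp (fun h => by simpa using h))
  rw [hstep1]
  have hA := A_fold (PySem.Dict.ofList sr)
    (PySem.List.sorted (PySem.Dict.ofList sr).keys (fun k => k) true) [] 0 hmem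
  rw [show (0:Int) + 1 = 1 by norm_num] at hA
  rw [hA, B_outer _ [] 0 0 none
    (by intro g hg; obtain ⟨k, hk, rfl⟩ := List.mem_map.1 hg; exact hmem k hk)
    (List.pairwise_map.2 (hgt.imp (fun h => ne_of_gt h)))
    (by simp)]
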